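-- pv_equiv track=rewrite | github.com/kestrel-git/algo | programmers/lv_0/코드 처리하기.py | solution
-- ===== SOURCE A (Python) =====
-- def solution(code):
--     mode = 0
--     ret = ''
--
--     for idx in range(len(code)):
--         if code[idx] != '1':
--             if idx % 2 == mode:
--                 ret += code[idx]
--         else:
--             mode ^= 1
--
--     return ret or 'EMPTY'
-- ===== SOURCE B (Python) =====
-- def solution(code):
--     # prefix-parity table: ones[i] = number of '1' chars strictly before position i
--     ones = [0]
--     for c in code:
--         ones.append(ones[-1] + (c == '1'))
--     kept = ''.join(c for i, (c, o) in enumerate(zip(code, ones))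
--                    if c != '1' and i % 2 == o % 2)
--     return kept if kept else 'EMPTY'
-- ===== Notes on version B (the rewrite author's own statement) =====
-- stated objective: alternative
-- what changed: A's single fused pass with a mutable parity toggle is replaced by two passes: first materialise a prefix table ones[i] = count of '1' characters strictly before i, then filter code by the stateless condition c != '1' and i % 2 == ones[i] % 2.
import Mathlib
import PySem

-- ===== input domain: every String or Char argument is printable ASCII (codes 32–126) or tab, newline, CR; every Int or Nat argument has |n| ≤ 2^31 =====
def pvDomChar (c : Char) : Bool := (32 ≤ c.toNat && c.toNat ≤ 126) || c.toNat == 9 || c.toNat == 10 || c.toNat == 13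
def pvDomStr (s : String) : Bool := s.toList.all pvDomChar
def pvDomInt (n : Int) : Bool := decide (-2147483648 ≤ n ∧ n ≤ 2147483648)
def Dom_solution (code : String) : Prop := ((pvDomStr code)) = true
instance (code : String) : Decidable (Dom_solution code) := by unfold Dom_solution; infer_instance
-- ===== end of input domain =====

-- B replaces A's fused single pass with a mutable running toggle by a materialised
-- prefix-count table plus a separate filtering pass (objective: alternative).

-- ===== PORT A =====
-- A's for-loop over range(len(code)) with running state (mode, ret); ret built by +=.
def solutionLoop : List Char → Nat → Nat → List Char → List Char
  | [], _, _, ret => ret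
  | c :: cs, idx, mode, ret =>
    if c ≠ '1' then
      if idx % 2 = mode then solutionLoop cs (idx + 1) mode (ret ++ [c])
      else solutionLoop cs (idx + 1) mode ret
    else solutionLoop cs (idx + 1) (mode ^^^ 1) ret

def solution (code : String) : String :=
  let ret := solutionLoop code.toList 0 0 []
  if ret = [] then "EMPTY" else String.mk ret

-- ===== PORT B =====
-- Source B's table loop `ones = [0]; for c in code: ones.append(ones[-1] + (c == '1'))`
-- is exactly a left scan; the second pass filters over enumerate(zip(code, ones)).
def solutionOnes (cs : List Char) : List Int :=
  List.scanl (fun a c => a + (if c = '1' then 1 else 0)) 0 cs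

def solution_alt (code : String) : String :=
  let cs := code.toList
  let kept := (PySem.List.enumerate (cs.zip (solutionOnes cs))).filterMap
      (fun p => if p.2.1 ≠ '1' ∧ p.1 % 2 = p.2.2 % 2 then some p.2.1 else none)
  if kept = [] then "EMPTY" else String.mk kept

-- ===== PRECONDITION & SPEC =====
def Spec_solution (code : String) (out : String) : Prop := out = solution_alt code
instance (code : String) (out : String) : Decidable (Spec_solution code out) := by unfold Spec_solution; infer_instance

-- ===== CLAIM (what is proved, stated in full; the proofs are below) =====
def Claim_equal_solution : Prop := ∀ (code : String), Dom_solution code → Spec_solution code (solution code)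

-- ===== LEMMAS AND PROOFS =====

-- Loop invariant: A's running toggle `mode` is the parity of the prefix count `a`
-- with which B's scan continues, and A's loop index is B's enumerate counter.
lemma solutionLoop_eq (cs : List Char) : ∀ (idx : Nat) (a : Int) (mode : Nat) (ret : List Char),
    mode < 2 → a % 2 = (mode : Int) →
    solutionLoop cs idx mode ret =
      ret ++ (PySem.List.enumerate (cs.zip (List.scanl (fun a c => a + (if c = '1' then 1 else 0)) a cs)) (idx : Int)).filterMap
        (fun p => if p.2.1 ≠ '1' ∧ p.1 % 2 = p.2.2 % 2 then some p.2.1 else none) := by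
  induction cs with
  | nil => intro idx a mode ret _ _; simp [solutionLoop, PySem.List.enumerate_nil]
  | cons c cs ih =>
    intro idx a mode ret hm ha
    have hcast : (idx : Int) + 1 = ((idx + 1 : Nat) : Int) := by push_cast; ring
    rw [List.scanl_cons, List.zip_cons_cons, PySem.List.enumerate_cons]
    by_cases hc : c = '1'
    · subst hc
      have hx : mode ^^^ 1 = 1 - mode := by interval_cases mode <;> decide
      rw [if_pos rfl, List.filterMap_cons_none (by simp), hcast,
        ← ih (idx + 1) (a + 1) (mode ^^^ 1) ret (by omega) (by rw [hx]; omega)]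
      simp only [solutionLoop]
      rw [if_neg (by simp)]
    · rw [if_neg hc, add_zero]
      simp only [solutionLoop]
      rw [if_pos hc]
      by_cases hp : idx % 2 = mode
      · rw [List.filterMap_cons_some (b := c) (by simp only []; rw [if_pos ⟨hc, by omega⟩]),
          if_pos hp, hcast, ih (idx + 1) a mode (ret ++ [c]) hm ha]
        simp
      · rw [List.filterMap_cons_none (by simp only []; rw [if_neg (by rintro ⟨_, h2⟩; exact hp (by omega))]),
          if_neg hp, hcast, ih (idx + 1) a mode ret hm ha]

-- ===== VERDICT (by name: the statement is the Claim_ definition above) =====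
theorem solution_spec : Claim_equal_solution := by
  intro code _
  unfold Spec_solution solution solution_alt solutionOnes
  rw [show ((0 : Int) = ((0 : Nat) : Int)) from rfl, solutionLoop_eq code.toList 0 0 0 [] (by omega) (by simp)]
  simp
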